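-- pv_equiv track=rewrite | github.com/IES-Rafael-Alberti/2324-u2-sentencias-repetitivas-javierac11 | src/ejercicio25.py | numeroPalabrasLargas
-- ===== SOURCE A (Python) =====
-- def numeroPalabrasLargas(frase_separada: list) -> int:
--     palabra_larga = ""
--     cont_palabras = 0
--     for palabra in frase_separada:
--         if  len(palabra) > len(palabra_larga):
--             palabra_larga = palabra
--             cont_palabras = 1
--         elif len(palabra) == len(palabra_larga):
--             cont_palabras += 1
--     return cont_palabras
-- ===== SOURCE B (Python) =====
-- def numeroPalabrasLargas(frase_separada: list) -> int:
--     m = max((len(w) for w in frase_separada), default=0)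
--     return sum(1 for w in frase_separada if len(w) == m)
-- ===== Notes on version B (the rewrite author's own statement) =====
-- stated objective: simpler
-- what changed: Replaces A's fused single scan tracking the longest word seen and a count with two plain passes: compute the maximum length (default 0), then count words of that length.
import Mathlib
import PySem

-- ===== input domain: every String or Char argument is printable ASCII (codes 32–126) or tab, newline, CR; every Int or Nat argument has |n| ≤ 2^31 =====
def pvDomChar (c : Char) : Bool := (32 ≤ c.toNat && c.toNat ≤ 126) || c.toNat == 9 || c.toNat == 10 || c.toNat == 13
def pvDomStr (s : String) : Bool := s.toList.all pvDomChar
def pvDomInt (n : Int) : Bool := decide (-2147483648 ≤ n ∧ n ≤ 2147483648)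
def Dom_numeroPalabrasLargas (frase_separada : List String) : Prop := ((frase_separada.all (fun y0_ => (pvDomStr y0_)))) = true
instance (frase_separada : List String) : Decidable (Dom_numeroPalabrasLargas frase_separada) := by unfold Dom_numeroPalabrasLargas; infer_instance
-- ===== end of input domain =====

-- B replaces A's fused longest-word-tracking scan with two separate passes (max length, then count); objective: simpler.

-- ===== PORT A =====
-- loop state: (palabra_larga, cont_palabras)
def numeroPalabrasLargas (frase_separada : List String) : Int :=
  (frase_separada.foldl
    (fun st palabra =>
      if PySem.Str.len palabra > PySem.Str.len st.1 then (palabra, 1)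
      else if PySem.Str.len palabra = PySem.Str.len st.1 then (st.1, st.2 + 1)
      else st)
    ("", 0)).2

-- ===== PORT B =====
def numeroPalabrasLargas_alt (frase_separada : List String) : Int :=
  let m := (PySem.List.max? (frase_separada.map PySem.Str.len) (fun x => x)).getD 0
  ((frase_separada.filter (fun w => PySem.Str.len w = m)).length : Int)

-- ===== PRECONDITION & SPEC =====
def Spec_numeroPalabrasLargas (frase_separada : List String) (out : Int) : Prop := out = numeroPalabrasLargas_alt frase_separada
instance (frase_separada : List String) (out : Int) : Decidable (Spec_numeroPalabrasLargas frase_separada out) := by unfold Spec_numeroPalabrasLargas; infer_instance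

-- ===== CLAIM (what is proved, stated in full; the proofs are below) =====
def Claim_equal_numeroPalabrasLargas : Prop := ∀ (frase_separada : List String), Dom_numeroPalabrasLargas frase_separada → Spec_numeroPalabrasLargas frase_separada (numeroPalabrasLargas frase_separada)

-- ===== LEMMAS AND PROOFS =====

-- running max of lengths of xs starting from m
def pvMaxLen (xs : List String) (m : Int) : Int :=
  xs.foldl (fun acc w => max acc (PySem.Str.len w)) m

theorem pvMaxLen_ge (xs : List String) (m : Int) : m ≤ pvMaxLen xs m := by
  induction xs generalizing m with
  | nil => simp [pvMaxLen]
  | cons w t ih =>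
    have := ih (max m (PySem.Str.len w))
    simp only [pvMaxLen, List.foldl_cons] at *
    exact le_trans (le_max_left _ _) this

-- loop invariant for A's fold
theorem loopA_inv (xs : List String) (p : String) (c : Int) :
    (xs.foldl
      (fun st palabra =>
        if PySem.Str.len palabra > PySem.Str.len st.1 then (palabra, 1)
        else if PySem.Str.len palabra = PySem.Str.len st.1 then (st.1, st.2 + 1)
        else st)
      (p, c)).2
    = (if pvMaxLen xs (PySem.Str.len p) = PySem.Str.len p then c else 0)
      + ((xs.filter (fun w => PySem.Str.len w = pvMaxLen xs (PySem.Str.len p))).length : Int) := by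
  induction xs generalizing p c with
  | nil => simp [pvMaxLen]
  | cons w t ih =>
    simp only [List.foldl_cons, List.filter_cons]
    have hcons : ∀ m : Int, pvMaxLen (w :: t) m = pvMaxLen t (max m (PySem.Str.len w)) := by
      intro m; simp only [pvMaxLen, List.foldl_cons]
    by_cases h1 : PySem.Str.len w > PySem.Str.len p
    · rw [if_pos h1, ih w 1, hcons, max_eq_right h1.le]
      have hge : PySem.Str.len w ≤ pvMaxLen t (PySem.Str.len w) := pvMaxLen_ge t _
      rw [if_neg (show ¬ pvMaxLen t (PySem.Str.len w) = PySem.Str.len p by omega)]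
      by_cases h2 : PySem.Str.len w = pvMaxLen t (PySem.Str.len w)
      · rw [if_pos h2.symm, if_pos (decide_eq_true h2)]
        simp only [List.length_cons]; push_cast; ring
      · rw [if_neg (fun h => h2 h.symm),
            if_neg (show ¬ (decide (PySem.Str.len w = pvMaxLen t (PySem.Str.len w)) = true) from
              by simp only [decide_eq_true_eq]; exact h2)]
    · rw [if_neg h1]
      by_cases h2 : PySem.Str.len w = PySem.Str.len p
      · rw [if_pos h2, ih p (c + 1), hcons, max_eq_left h2.le]
        by_cases h3 : pvMaxLen t (PySem.Str.len p) = PySem.Str.len p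
        · rw [if_pos h3, if_pos h3, if_pos (decide_eq_true (h2.trans h3.symm))]
          simp only [List.length_cons]; push_cast; ring
        · rw [if_neg h3, if_neg h3,
              if_neg (show ¬ (decide (PySem.Str.len w = pvMaxLen t (PySem.Str.len p)) = true) from
                by simp only [decide_eq_true_eq]; omega)]
      · rw [if_neg h2, ih p c, hcons,
            max_eq_left (show PySem.Str.len w ≤ PySem.Str.len p by omega)]
        have hge : PySem.Str.len p ≤ pvMaxLen t (PySem.Str.len p) := pvMaxLen_ge t _
        rw [if_neg (show ¬ (decide (PySem.Str.len w = pvMaxLen t (PySem.Str.len p)) = true) from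
              by simp only [decide_eq_true_eq]; omega)]

theorem str_len_nonneg (w : String) : 0 ≤ PySem.Str.len w := by
  simp [PySem.Str.len_eq]

theorem foldl_max_map (t : List String) (m : Int) :
    List.foldl max m (t.map PySem.Str.len)
    = t.foldl (fun acc w => max acc (PySem.Str.len w)) m := by
  induction t generalizing m with
  | nil => simp
  | cons v s ih => simp only [List.map_cons, List.foldl_cons]; exact ih _

-- B's max equals the running max with initial 0
theorem altMax_eq (xs : List String) :
    (PySem.List.max? (xs.map PySem.Str.len) (fun x => x)).getD 0 = pvMaxLen xs 0 := by
  cases xs with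
  | nil => simp [PySem.List.max?, pvMaxLen]
  | cons w t =>
    simp only [List.map_cons]
    rw [PySem.List.max?_id_cons]
    simp only [Option.getD_some, pvMaxLen, List.foldl_cons]
    have h0 : max (0 : Int) (PySem.Str.len w) = PySem.Str.len w :=
      max_eq_right (str_len_nonneg w)
    rw [h0]
    exact foldl_max_map t _

-- ===== VERDICT (by name: the statement is the Claim_ definition above) =====
theorem numeroPalabrasLargas_spec : Claim_equal_numeroPalabrasLargas := by
  intro xs _
  unfold Spec_numeroPalabrasLargas numeroPalabrasLargas numeroPalabrasLargas_alt
  rw [altMax_eq]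
  have h0 : PySem.Str.len "" = 0 := by decide
  have := loopA_inv xs "" 0
  rw [h0] at this
  rw [this]
  have hM : pvMaxLen xs 0 = 0 ∨ 0 < pvMaxLen xs 0 := by
    have := pvMaxLen_ge xs 0; omega
  by_cases h : pvMaxLen xs 0 = 0
  · simp [h]
  · simp [h]
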